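-- pv_equiv track=rewrite | github.com/epfl-dlab/deplatforming_dataset | scripts/read_reddit_files.py | in_dict
-- ===== SOURCE A (Python) =====
-- def in_dict(s, entities_list, entities_dict):
--     ''' Checks if a text s contains en entity (in entities_list) and its associated platforms (in entities_dict)
--     '''
--     matches = {x for x in entities_list if x in s}
--     if len(matches) == 0:
--         return False
--     for m in matches:
--         if entities_dict[m] in s.lower():
--             return True
--     return False
-- ===== SOURCE B (Python) =====
-- def in_dict(s, entities_list, entities_dict):
--     ''' Checks if a text s contains en entity (in entities_list) and its associated platforms (in entities_dict)
--     '''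
--     # Inverted staging: first pass over the DICT collecting keys whose platform
--     # occurs in s.lower() (computed once); second pass over the list tests only
--     # membership in that key set plus substring in s -- no dict lookup ever happens
--     # during the entity scan.
--     sl = s.lower()
--     keys_with_platform = {k for k, v in entities_dict.items() if v in sl}
--     for x in entities_list:
--         if x in keys_with_platform and x in s:
--             return True
--     return False
-- ===== Notes on version B (the rewrite author's own statement) =====
-- stated objective: faster
-- what changed: A first scans the entity list building the set of entities occurring in s, then loops over that set looking each entity up in the dict and recomputing s.lower() for every lookup; B inverts the staging: it scans the dictionary once (s.lower() computed once) collecting the keys whose platform occurs in the lowered text, then scans the entity list testing only set membership and substring-in-s, with no dict lookup and no lowering in the entity scan.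
import Mathlib
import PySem

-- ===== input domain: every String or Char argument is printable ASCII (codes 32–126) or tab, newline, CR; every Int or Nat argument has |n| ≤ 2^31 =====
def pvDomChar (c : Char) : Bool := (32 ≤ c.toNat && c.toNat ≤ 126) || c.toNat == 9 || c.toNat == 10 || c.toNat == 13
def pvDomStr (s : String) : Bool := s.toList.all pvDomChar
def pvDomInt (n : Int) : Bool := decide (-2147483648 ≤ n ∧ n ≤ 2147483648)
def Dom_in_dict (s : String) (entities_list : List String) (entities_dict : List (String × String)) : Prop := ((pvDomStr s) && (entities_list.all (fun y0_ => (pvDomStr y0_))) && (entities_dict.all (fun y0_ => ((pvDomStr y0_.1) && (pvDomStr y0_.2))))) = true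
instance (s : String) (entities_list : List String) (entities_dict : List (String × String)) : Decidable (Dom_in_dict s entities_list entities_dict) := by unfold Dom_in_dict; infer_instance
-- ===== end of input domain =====

-- B inverts A's staging: instead of collecting the entities that occur in s and then looking each up in the
-- dict (recomputing s.lower() each time), B scans the dictionary once (s.lower() computed once) collecting
-- the keys whose platform occurs in the lowered text, then scans the entity list with no dict lookup at all.

-- ===== PORT A =====
-- 'for m in matches: if entities_dict[m] in s.lower(): return True' ; a missing key is Python's KeyError
-- (excluded by Pre_), here the 'none' branch.
def inDictLoopA (d : PySem.Dict String String) (s : String) : List String → Bool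
  | [] => false
  | m :: rest =>
    match d.get? m with
    | some p => if PySem.Str.isIn p (PySem.Str.lower s) then true else inDictLoopA d s rest
    | none => false   -- A raises KeyError here; inputs reaching this branch are outside Pre_in_dict

def in_dict (s : String) (entities_list : List String) (entities_dict : List (String × String)) : Bool :=
  let found : PySem.Set String :=
    PySem.Set.ofList (entities_list.filter (fun x => PySem.Str.isIn x s))
  if found.length == 0 then false
  else inDictLoopA (PySem.Dict.ofList entities_dict) s found

-- ===== PORT B =====
-- 'for x in entities_list: if x in keys_with_platform and x in s: return True' / 'return False'
def inDictLoopB (good : PySem.Set String) (s : String) : List String → Bool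
  | [] => false
  | x :: rest =>
    if PySem.Set.contains good x && PySem.Str.isIn x s then true
    else inDictLoopB good s rest

def in_dict_alt (s : String) (entities_list : List String) (entities_dict : List (String × String)) : Bool :=
  let sl := PySem.Str.lower s
  let good : PySem.Set String :=
    PySem.Set.ofList
      (((PySem.Dict.ofList entities_dict).items.filter (fun kv => PySem.Str.isIn kv.2 sl)).map Prod.fst)
  inDictLoopB good s entities_list

-- ===== PRECONDITION & SPEC =====
-- Pre_ excludes exactly the inputs on which A raises KeyError: some entity of entities_list occurs in s
-- but is not a key of entities_dict.
def Pre_in_dict (s : String) (entities_list : List String) (entities_dict : List (String × String)) : Prop :=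
  ∀ x ∈ entities_list, PySem.Str.isIn x s = true → x ∈ (PySem.Dict.ofList entities_dict).keys
instance (s : String) (entities_list : List String) (entities_dict : List (String × String)) : Decidable (Pre_in_dict s entities_list entities_dict) := by unfold Pre_in_dict; infer_instance

def pvWitness_in_dict : String × List String × (List (String × String)) :=
  ("Hello World", ["World", "xyz"], [("World", "hello"), ("Moon", "mars")])

def Spec_in_dict (s : String) (entities_list : List String) (entities_dict : List (String × String)) (out : Bool) : Prop := out = in_dict_alt s entities_list entities_dict
instance (s : String) (entities_list : List String) (entities_dict : List (String × String)) (out : Bool) : Decidable (Spec_in_dict s entities_list entities_dict out) := by unfold Spec_in_dict; infer_instance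

-- ===== CLAIM (what is proved, stated in full; the proofs are below) =====
def Claim_equal_in_dict : Prop := ∀ (s : String) (entities_list : List String) (entities_dict : List (String × String)), Dom_in_dict s entities_list entities_dict → Pre_in_dict s entities_list entities_dict → Spec_in_dict s entities_list entities_dict (in_dict s entities_list entities_dict)

-- ===== LEMMAS AND PROOFS =====

-- A's inner loop, when every visited entity is a key, is an existential over the visited list.
theorem inDictLoopA_eq_any (d : PySem.Dict String String) (s : String) (ms : List String)
    (h : ∀ m ∈ ms, m ∈ d.keys) :
    inDictLoopA d s ms
      = ms.any (fun m => PySem.Str.isIn ((d.get? m).getD "") (PySem.Str.lower s)) := by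
  induction ms with
  | nil => rfl
  | cons m rest ih =>
    have hm : m ∈ d.keys := h m (List.mem_cons_self)
    obtain ⟨p, hp⟩ : ∃ p, d.get? m = some p := by
      cases hg : d.get? m with
      | none => exact absurd hm ((PySem.Dict.get?_eq_none_iff_not_mem_keys d m).mp hg)
      | some p => exact ⟨p, rfl⟩
    have hstep : inDictLoopA d s (m :: rest)
        = if PySem.Str.isIn p (PySem.Str.lower s) then true else inDictLoopA d s rest := by
      simp only [inDictLoopA, hp]
    rw [hstep, List.any_cons, hp, Option.getD_some,
        ih (fun x hx => h x (List.mem_cons_of_mem _ hx))]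
    cases hpi : PySem.Str.isIn p (PySem.Str.lower s) <;> simp

-- A is true iff some entity of the list occurs in s and its dict value occurs in s.lower().
theorem in_dict_true_iff (s : String) (el : List String) (ed : List (String × String))
    (hpre : Pre_in_dict s el ed) :
    in_dict s el ed = true ↔
      ∃ x p, x ∈ el ∧ PySem.Str.isIn x s = true ∧
        (PySem.Dict.ofList ed).get? x = some p ∧ PySem.Str.isIn p (PySem.Str.lower s) = true := by
  unfold in_dict
  set d := PySem.Dict.ofList ed with hd
  set fnd := PySem.Set.ofList (el.filter (fun x => PySem.Str.isIn x s)) with hfnd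
  have hmem : ∀ m, m ∈ fnd ↔ m ∈ el ∧ PySem.Str.isIn m s = true := by
    intro m
    rw [hfnd, PySem.Set.mem_ofList, List.mem_filter]
  have hkeys : ∀ m ∈ fnd, m ∈ d.keys := by
    intro m hmm; rcases (hmem m).mp hmm with ⟨h1, h2⟩; exact hpre m h1 h2
  have hcollapse : (if (fnd.length == 0) = true then false else inDictLoopA d s fnd)
      = fnd.any (fun m => PySem.Str.isIn ((d.get? m).getD "") (PySem.Str.lower s)) := by
    split_ifs with hz
    · have hnil : fnd = [] := List.length_eq_zero_iff.mp (by simpa using hz)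
      rw [hnil]; rfl
    · exact inDictLoopA_eq_any d s fnd hkeys
  rw [hcollapse, List.any_eq_true]
  constructor
  · rintro ⟨m, hmm, hi⟩
    rcases (hmem m).mp hmm with ⟨h1, h2⟩
    obtain ⟨p, hp⟩ : ∃ p, d.get? m = some p := by
      have hk := hkeys m hmm
      cases hg : d.get? m with
      | none => exact absurd hk ((PySem.Dict.get?_eq_none_iff_not_mem_keys d m).mp hg)
      | some p => exact ⟨p, rfl⟩
    rw [hp, Option.getD_some] at hi
    exact ⟨m, p, h1, h2, hp, hi⟩
  · rintro ⟨x, p, h1, h2, hp, hi⟩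
    refine ⟨x, (hmem x).mpr ⟨h1, h2⟩, ?_⟩
    rw [hp, Option.getD_some]; exact hi

-- B's entity loop is an existential over the list.
theorem inDictLoopB_eq_any (good : PySem.Set String) (s : String) (xs : List String) :
    inDictLoopB good s xs
      = xs.any (fun x => PySem.Set.contains good x && PySem.Str.isIn x s) := by
  induction xs with
  | nil => rfl
  | cons x rest ih =>
    rw [List.any_cons, ← ih]
    simp only [inDictLoopB]
    cases h : (PySem.Set.contains good x && PySem.Str.isIn x s) <;> simp_all

-- B is true iff the same existential holds.
theorem in_dict_alt_true_iff (s : String) (el : List String) (ed : List (String × String)) :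
    in_dict_alt s el ed = true ↔
      ∃ x p, x ∈ el ∧ PySem.Str.isIn x s = true ∧
        (PySem.Dict.ofList ed).get? x = some p ∧ PySem.Str.isIn p (PySem.Str.lower s) = true := by
  unfold in_dict_alt
  set d := PySem.Dict.ofList ed with hd
  have hnd : d.keys.Nodup := PySem.Dict.nodup_keys_ofList ed
  rw [inDictLoopB_eq_any, List.any_eq_true]
  have hgood : ∀ x, x ∈ PySem.Set.ofList
        ((d.items.filter (fun kv => PySem.Str.isIn kv.2 (PySem.Str.lower s))).map Prod.fst)
      ↔ ∃ p, d.get? x = some p ∧ PySem.Str.isIn p (PySem.Str.lower s) = true := by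
    intro x
    rw [PySem.Set.mem_ofList, List.mem_map]
    constructor
    · rintro ⟨⟨k, p⟩, hkp, rfl⟩
      rw [List.mem_filter] at hkp
      exact ⟨p, (PySem.Dict.get?_eq_some_iff_mem_items d k p hnd).mpr hkp.1, hkp.2⟩
    · rintro ⟨p, hp, hi⟩
      exact ⟨(x, p), List.mem_filter.mpr
        ⟨(PySem.Dict.get?_eq_some_iff_mem_items d x p hnd).mp hp, hi⟩, rfl⟩
  constructor
  · rintro ⟨x, hx, hcond⟩
    rw [Bool.and_eq_true, PySem.Set.contains_iff] at hcond
    rcases (hgood x).mp hcond.1 with ⟨p, hp, hi⟩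
    exact ⟨x, p, hx, hcond.2, hp, hi⟩
  · rintro ⟨x, p, h1, h2, hp, hi⟩
    refine ⟨x, h1, ?_⟩
    rw [Bool.and_eq_true, PySem.Set.contains_iff]
    exact ⟨(hgood x).mpr ⟨p, hp, hi⟩, h2⟩

-- ===== VERDICT (by name: the statement is the Claim_ definition above) =====
theorem in_dict_spec : Claim_equal_in_dict := by
  intro s el ed _ hpre
  unfold Spec_in_dict
  rw [Bool.eq_iff_iff, in_dict_true_iff s el ed hpre, in_dict_alt_true_iff s el ed]
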